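-- pv_equiv track=rewrite | github.com/Rosemarries/OOD-OMG | Day01/test07.py | weirdSubtract
-- ===== SOURCE A (Python) =====
-- def weirdSubtract(n,k):
--     if(k == 0):
--         return n
--     if(n%10 == 0):
--         n //= 10
--     else:
--         n -= 1
--     k -= 1
--     return weirdSubtract(n,k)
-- ===== SOURCE B (Python) =====
-- def weirdSubtract(n, k):
--     # Batched: once n == 0 it stays 0; a run of decrements down to the next
--     # multiple of 10 is done in one arithmetic step.
--     while k > 0:
--         if n == 0:
--             return 0
--         r = n % 10
--         if r == 0:
--             n //= 10
--             k -= 1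
--         else:
--             s = r if r < k else k
--             n -= s
--             k -= s
--     return n
-- ===== Notes on version B (the rewrite author's own statement) =====
-- stated objective: faster
-- what changed: Replaces the one-step-per-call recursion (k calls) by a loop that batches each run of decrements down to the next multiple of 10 into a single subtraction and exits as soon as n reaches 0; Pre_ requires k >= 0 because A never returns (RecursionError) for negative k.
import Mathlib
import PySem

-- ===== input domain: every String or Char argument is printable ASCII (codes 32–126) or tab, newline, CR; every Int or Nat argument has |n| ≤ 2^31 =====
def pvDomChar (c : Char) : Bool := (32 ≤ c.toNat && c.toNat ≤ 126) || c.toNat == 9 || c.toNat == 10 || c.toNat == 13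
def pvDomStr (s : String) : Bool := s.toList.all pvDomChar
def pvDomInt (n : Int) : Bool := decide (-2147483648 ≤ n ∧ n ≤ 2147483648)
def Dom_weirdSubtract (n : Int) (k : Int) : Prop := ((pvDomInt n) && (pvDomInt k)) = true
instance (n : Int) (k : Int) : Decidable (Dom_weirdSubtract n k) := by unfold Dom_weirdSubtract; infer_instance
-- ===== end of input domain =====

-- B batches the decrement runs and early-exits at n = 0 (faster in a timing run); A = B proved for k ≥ 0.

-- ===== PORT A =====
-- A recurses with k-1 until k == 0; for k < 0 the Python never returns (RecursionError),
-- which Pre_ excludes. The recursion is modelled with fuel k.toNat, which is exact for k ≥ 0: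
-- the inner `k == 0` test fires exactly when the fuel runs out.
def weirdSubtractGo (n : Int) (k : Int) : Nat → Int
  | 0 => n
  | f + 1 =>
    if k == 0 then n
    else
      let n' := if PySem.Int.mod n 10 == 0 then PySem.Int.floordiv n 10 else n - 1
      weirdSubtractGo n' (k - 1) f

def weirdSubtract (n : Int) (k : Int) : Int := weirdSubtractGo n k k.toNat

-- ===== PORT B =====
def weirdSubtract_alt (n : Int) (k : Int) : Int :=
  if _hk : 0 < k then
    if n == 0 then 0
    else
      let r := PySem.Int.mod n 10
      if r == 0 then weirdSubtract_alt (PySem.Int.floordiv n 10) (k - 1)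
      else
        let s := if r < k then r else k
        weirdSubtract_alt (n - s) (k - s)
  else n
termination_by k.toNat
decreasing_by
  · omega
  · rename_i _hn hr
    have hmod : PySem.Int.mod n 10 = n % 10 := PySem.Int.mod_eq_emod_of_pos (by omega)
    have hne : PySem.Int.mod n 10 ≠ 0 := by intro h; exact hr (beq_iff_eq.mpr h)
    split <;> omega

-- ===== PRECONDITION & SPEC =====
-- Pre_ excludes k < 0, on which Python A recurses forever (RecursionError); A returns on all k ≥ 0.
def Pre_weirdSubtract (n : Int) (k : Int) : Prop := 0 ≤ k
instance (n : Int) (k : Int) : Decidable (Pre_weirdSubtract n k) := by unfold Pre_weirdSubtract; infer_instance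
def pvWitness_weirdSubtract : Int × Int := (37, 12)

def Spec_weirdSubtract (n : Int) (k : Int) (out : Int) : Prop := out = weirdSubtract_alt n k
instance (n : Int) (k : Int) (out : Int) : Decidable (Spec_weirdSubtract n k out) := by unfold Spec_weirdSubtract; infer_instance

-- ===== CLAIM (what is proved, stated in full; the proofs are below) =====
def Claim_equal_weirdSubtract : Prop := ∀ (n : Int) (k : Int), Dom_weirdSubtract n k → Pre_weirdSubtract n k → Spec_weirdSubtract n k (weirdSubtract n k)

-- ===== LEMMAS AND PROOFS =====

-- once n = 0, A keeps dividing 0 by 10 and returns 0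
lemma goA_zero (k : Int) (f : Nat) : weirdSubtractGo 0 k f = 0 := by
  induction f generalizing k with
  | zero => rfl
  | succ f ih =>
    simp only [weirdSubtractGo]
    split
    · rfl
    · simpa [PySem.Int.mod, PySem.Int.floordiv] using ih (k - 1)

-- a batch of s decrements of A collapses
lemma goA_batch (j : Nat) (n k : Int) (hj : 0 < (j : Int)) (hjr : (j : Int) ≤ PySem.Int.mod n 10)
    (hjk : (j : Int) ≤ k) :
    weirdSubtractGo n k k.toNat = weirdSubtractGo (n - j) (k - j) (k - j).toNat := by
  induction j generalizing n k with
  | zero => simp at hj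
  | succ j ih =>
    have hmod : PySem.Int.mod n 10 = n % 10 := PySem.Int.mod_eq_emod_of_pos (by omega)
    have hne : PySem.Int.mod n 10 ≠ 0 := by push_cast at hjr; omega
    have hk0 : k ≠ 0 := by push_cast at hjk; omega
    have hfuel : k.toNat = (k - 1).toNat + 1 := by push_cast at hjk; omega
    rw [hfuel]
    simp only [weirdSubtractGo, hk0, hne, if_false, beq_iff_eq]
    by_cases hj0 : j = 0
    · subst hj0; push_cast; ring_nf
    · have hmod2 : PySem.Int.mod (n - 1) 10 = (n - 1) % 10 :=
        PySem.Int.mod_eq_emod_of_pos (by omega)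
      have hmod' : PySem.Int.mod (n - 1) 10 = PySem.Int.mod n 10 - 1 := by
        have h1 : 1 ≤ n % 10 := by push_cast at hjr; omega
        rw [hmod2, hmod]; omega
      have := ih (n - 1) (k - 1) (by omega)
        (by rw [hmod']; push_cast at hjr ⊢; omega) (by push_cast at hjk ⊢; omega)
      rw [this]; push_cast; ring_nf

lemma goA_eq_alt (n k : Int) (hk : 0 ≤ k) : weirdSubtractGo n k k.toNat = weirdSubtract_alt n k := by
  generalize hm : k.toNat = m
  induction m using Nat.strong_induction_on generalizing n k with
  | _ m ih =>
  by_cases hpos : 0 < k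
  · rw [weirdSubtract_alt.eq_def]
    rw [dif_pos hpos]
    by_cases hn0 : n = 0
    · subst hn0; simp only [beq_self_eq_true, if_true, ← hm, goA_zero]
    · rw [if_neg (by simpa using hn0)]
      have hmod : PySem.Int.mod n 10 = n % 10 := PySem.Int.mod_eq_emod_of_pos (by omega)
      by_cases hr0 : PySem.Int.mod n 10 = 0
      · -- one division step
        have hfuel : k.toNat = (k - 1).toNat + 1 := by omega
        rw [← hm, hfuel]
        simp only [weirdSubtractGo, beq_iff_eq, if_neg (by omega : k ≠ 0), hr0]
        exact ih (k - 1).toNat (by omega) _ _ (by omega) rfl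
      · rw [if_neg (by simpa using hr0)]
        have hrpos : 0 < PySem.Int.mod n 10 := by
          have := Int.emod_nonneg n (by omega : (10:Int) ≠ 0); omega
        set s : Int := if PySem.Int.mod n 10 < k then PySem.Int.mod n 10 else k with hs
        have hs1 : 0 < s := by rw [hs]; split <;> omega
        have hsr : s ≤ PySem.Int.mod n 10 := by rw [hs]; split <;> omega
        have hsk : s ≤ k := by rw [hs]; split <;> omega
        obtain ⟨j, hj⟩ : ∃ j : Nat, (j : Int) = s := ⟨s.toNat, by omega⟩
        have hb := goA_batch j n k (by omega) (by omega) (by omega)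
        rw [← hm, hb, hj]
        exact ih (k - s).toNat (by omega) _ _ (by omega) rfl
  · have hk0 : k = 0 := by omega
    subst hk0
    have hm0 : m = 0 := by simpa using hm.symm
    subst hm0
    rw [weirdSubtract_alt.eq_def]
    simp [weirdSubtractGo]

-- ===== VERDICT (by name: the statement is the Claim_ definition above) =====
theorem weirdSubtract_spec : Claim_equal_weirdSubtract := by
  intro n k _ hk
  unfold Spec_weirdSubtract weirdSubtract
  exact goA_eq_alt n k hk
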